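-- pv_equiv track=rewrite | github.com/tumBAIS/staggered_routing_in_amod_systems | sets_of_experiments/tools/barplot_conflicting_sets.py | compute_conflicting_sets
-- ===== SOURCE A (Python) =====
-- from collections import defaultdict
--
-- def compute_conflicting_sets(trip_routes, capacities):
--     conflicting_sets = defaultdict(list)
--     for trip_id, arcs in enumerate(trip_routes):
--         for arc in arcs:
--             if arc != 0:  # Ignore the dummy arc (0)
--                 conflicting_sets[arc].append(trip_id)
--     # Remove conflicting sets that fit within capacity
--     for arc, trips in conflicting_sets.items():
--         if len(trips) <= capacities[arc]:
--             conflicting_sets[arc] = []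
--     return [trips for trips in conflicting_sets.values() if trips]  # Filter out empty lists
-- ===== SOURCE B (Python) =====
-- def compute_conflicting_sets(trip_routes, capacities):
--     # count-first decomposition: tally arc usage, pick over-capacity arcs, then build only those lists
--     counts = {}
--     for arcs in trip_routes:
--         for arc in arcs:
--             if arc != 0:
--                 counts[arc] = counts.get(arc, 0) + 1
--     lists = {}
--     for arc, cnt in counts.items():
--         if cnt > capacities[arc]:
--             lists[arc] = []
--     for trip_id, arcs in enumerate(trip_routes):
--         for arc in arcs:
--             if arc != 0 and arc in lists:
--                 lists[arc].append(trip_id)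
--     return list(lists.values())
-- ===== Notes on version B (the rewrite author's own statement) =====
-- stated objective: alternative
-- what changed: Replaces A's build-all-lists-then-zero-then-filter defaultdict pipeline with a two-pass count-table-first decomposition: first tally per-arc usage counts, select the over-capacity arcs, then a second pass builds trip lists only for those arcs.
import Mathlib
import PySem

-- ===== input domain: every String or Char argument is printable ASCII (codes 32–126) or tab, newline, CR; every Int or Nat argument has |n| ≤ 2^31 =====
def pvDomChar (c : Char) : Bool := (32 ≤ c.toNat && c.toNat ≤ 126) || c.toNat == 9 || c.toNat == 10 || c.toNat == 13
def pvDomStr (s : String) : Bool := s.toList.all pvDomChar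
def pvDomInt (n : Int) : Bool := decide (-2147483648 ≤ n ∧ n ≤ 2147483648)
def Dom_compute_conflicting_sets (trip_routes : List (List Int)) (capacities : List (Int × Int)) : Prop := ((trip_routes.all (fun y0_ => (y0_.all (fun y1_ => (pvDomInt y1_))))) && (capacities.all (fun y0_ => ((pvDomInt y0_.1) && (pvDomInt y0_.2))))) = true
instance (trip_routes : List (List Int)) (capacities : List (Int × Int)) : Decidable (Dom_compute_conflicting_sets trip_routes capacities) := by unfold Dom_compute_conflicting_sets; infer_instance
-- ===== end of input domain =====

-- B replaces A's build-all-lists-then-zero-then-filter pipeline by a count-table-first two-pass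
-- decomposition (tally counts, select over-capacity arcs, build only those lists); alternative, same cost.


-- ===== PORT A =====
-- capacities[arc] is a dict lookup; under Pre_ the key is present, ported as getD _ 0
def compute_conflicting_sets (trip_routes : List (List Int)) (capacities : List (Int × Int)) : List (List Int) :=
  let conflicting_sets : PySem.Dict Int (List Int) :=
    (PySem.List.enumerate trip_routes 0).foldl
      (fun d p => p.2.foldl
        (fun d arc => if arc ≠ 0 then d.modify arc [] (fun l => l ++ [p.1]) else d) d)
      PySem.Dict.empty
  let conflicting_sets2 :=
    conflicting_sets.items.foldl
      (fun d p => if (p.2.length : Int) ≤ (PySem.Dict.mk capacities).getD p.1 0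
                  then d.insert p.1 ([] : List Int) else d)
      conflicting_sets
  conflicting_sets2.values.filter (fun trips => !trips.isEmpty)

-- ===== PORT B =====
def compute_conflicting_sets_alt (trip_routes : List (List Int)) (capacities : List (Int × Int)) : List (List Int) :=
  let counts : PySem.Dict Int Int :=
    trip_routes.foldl
      (fun c arcs => arcs.foldl
        (fun c arc => if arc ≠ 0 then c.insert arc (c.getD arc 0 + 1) else c) c)
      PySem.Dict.empty
  let lists0 : PySem.Dict Int (List Int) :=
    counts.items.foldl
      (fun L p => if (PySem.Dict.mk capacities).getD p.1 0 < p.2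
                  then L.insert p.1 ([] : List Int) else L)
      PySem.Dict.empty
  let lists :=
    (PySem.List.enumerate trip_routes 0).foldl
      (fun L p => p.2.foldl
        (fun L arc => if arc ≠ 0 then
            (if L.contains arc then L.insert arc (L.getD arc [] ++ [p.1]) else L)
          else L) L)
      lists0
  lists.values

-- ===== PRECONDITION & SPEC =====
-- Pre_ excludes exactly the inputs where Python A raises KeyError: a non-zero arc with no capacities entry.
def Pre_compute_conflicting_sets (trip_routes : List (List Int)) (capacities : List (Int × Int)) : Prop :=
  ∀ r ∈ trip_routes, ∀ a ∈ r, a ≠ 0 → a ∈ capacities.map (·.1)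
instance (trip_routes : List (List Int)) (capacities : List (Int × Int)) : Decidable (Pre_compute_conflicting_sets trip_routes capacities) := by unfold Pre_compute_conflicting_sets; infer_instance
def pvWitness_compute_conflicting_sets : List (List Int) × (List (Int × Int)) := ([[1], [1]], [(1, 1)])
def Spec_compute_conflicting_sets (trip_routes : List (List Int)) (capacities : List (Int × Int)) (out : List (List Int)) : Prop := out = compute_conflicting_sets_alt trip_routes capacities
instance (trip_routes : List (List Int)) (capacities : List (Int × Int)) (out : List (List Int)) : Decidable (Spec_compute_conflicting_sets trip_routes capacities out) := by unfold Spec_compute_conflicting_sets; infer_instance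

-- ===== CLAIM (what is proved, stated in full; the proofs are below) =====
def Claim_equal_compute_conflicting_sets : Prop := ∀ (trip_routes : List (List Int)) (capacities : List (Int × Int)), Dom_compute_conflicting_sets trip_routes capacities → Pre_compute_conflicting_sets trip_routes capacities → Spec_compute_conflicting_sets trip_routes capacities (compute_conflicting_sets trip_routes capacities)

-- ===== LEMMAS AND PROOFS =====

def pvPairs (trip_routes : List (List Int)) : List (Int × Int) :=
  (PySem.List.enumerate trip_routes 0).flatMap
    (fun p => (p.2.filter (fun a => a != 0)).map (fun a => (a, p.1)))

def pvCap (capacities : List (Int × Int)) (k : Int) : Int := (PySem.Dict.mk capacities).getD k 0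

def pvD (tr : List (List Int)) : PySem.Dict Int (List Int) :=
  (pvPairs tr).foldl (fun d q => d.modify q.1 [] (fun l => l ++ [q.2])) PySem.Dict.empty

def pvF (tr : List (List Int)) (k : Int) : List Int :=
  ((pvPairs tr).filter (fun q => q.1 == k)).map (fun q => q.2)

def pvKeys (tr : List (List Int)) : List Int := PySem.Set.ofList ((pvPairs tr).map (fun q => q.1))

theorem pv_nested_fold {α : Type} (l : List (Int × List Int)) (f : α → Int × Int → α) (init : α) :
    l.foldl (fun d p => p.2.foldl (fun d arc => if arc ≠ 0 then f d (arc, p.1) else d) d) init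
      = (l.flatMap (fun p => (p.2.filter (fun a => a != 0)).map (fun a => (a, p.1)))).foldl f init := by
  induction l generalizing init with
  | nil => rfl
  | cons p l ih =>
    simp only [List.foldl_cons, List.flatMap_cons, List.foldl_append, ih]
    congr 1
    rw [List.foldl_map, List.foldl_filter]
    simp

theorem pvD_getD (tr : List (List Int)) (k : Int) : (pvD tr).getD k [] = pvF tr k := by
  unfold pvD pvF
  rw [PySem.Dict.getD_foldl_modify_append]
  simp [PySem.Dict.getD_empty]

theorem pvD_keys (tr : List (List Int)) : (pvD tr).keys = pvKeys tr := by
  unfold pvD pvKeys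
  rw [PySem.Dict.keys_foldl_modify_key, PySem.Dict.keys_empty, PySem.Set.update_nil_left]

theorem pvD_nodup (tr : List (List Int)) : (pvD tr).keys.Nodup :=
  PySem.Dict.nodup_keys_foldl_modify_key _ _ _ _ _ PySem.Dict.nodup_keys_empty

theorem pvF_length (tr : List (List Int)) (k : Int) :
    (((pvPairs tr).map (fun q => q.1)).count k : Int) = ((pvF tr k).length : Int) := by
  unfold pvF
  rw [List.length_map, List.count_eq_countP, List.countP_map, ← List.countP_eq_length_filter]
  rfl

theorem pvF_ne_nil (tr : List (List Int)) (k : Int) (h : k ∈ pvKeys tr) : pvF tr k ≠ [] := by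
  unfold pvKeys at h
  rw [PySem.Set.mem_ofList, List.mem_map] at h
  obtain ⟨q, hq, rfl⟩ := h
  unfold pvF
  simp only [ne_eq, List.map_eq_nil_iff, List.filter_eq_nil_iff, not_forall]
  exact ⟨q, hq, by simp⟩

theorem pv_zero_pass_getD (l : List (Int × List Int)) (cond : Int × List Int → Prop)
    [DecidablePred cond] (d : PySem.Dict Int (List Int)) (k : Int) :
    (l.foldl (fun d p => if cond p then d.insert p.1 ([] : List Int) else d) d).getD k []
      = if (∃ p ∈ l, p.1 = k ∧ cond p) then [] else d.getD k [] := by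
  induction l generalizing d with
  | nil => simp
  | cons p l ih =>
    have hsplit : (∃ q ∈ p :: l, q.1 = k ∧ cond q) ↔
        ((p.1 = k ∧ cond p) ∨ ∃ q ∈ l, q.1 = k ∧ cond q) := List.exists_mem_cons_iff _ _ _
    simp only [List.foldl_cons, hsplit]
    by_cases hc : cond p
    · rw [if_pos hc, ih, PySem.Dict.getD_insert]
      by_cases hk : k = p.1
      · rw [if_pos (Or.inl ⟨hk.symm, hc⟩)]
        split_ifs <;> rfl
      · rw [if_neg hk]
        have hiff : ((p.1 = k ∧ cond p) ∨ ∃ q ∈ l, q.1 = k ∧ cond q) ↔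
            (∃ q ∈ l, q.1 = k ∧ cond q) := by
          constructor
          · rintro (⟨h, -⟩ | h)
            · exact absurd h.symm hk
            · exact h
          · exact Or.inr
        simp only [hiff]
    · rw [if_neg hc, ih]
      have : ¬(p.1 = k ∧ cond p) := fun h => hc h.2
      simp only [this, false_or]

theorem pv_zero_pass_keys (l : List (Int × List Int)) (cond : Int × List Int → Prop)
    [DecidablePred cond] (d : PySem.Dict Int (List Int)) (h : ∀ p ∈ l, d.contains p.1) :
    (l.foldl (fun d p => if cond p then d.insert p.1 ([] : List Int) else d) d).keys = d.keys := by
  induction l generalizing d with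
  | nil => rfl
  | cons p l ih =>
    simp only [List.foldl_cons]
    by_cases hc : cond p
    · rw [if_pos hc, ih, PySem.Dict.keys_insert_of_contains _ _ (h p (List.mem_cons_self ..))]
      intro q hq
      rw [PySem.Dict.contains_insert]
      simp [h q (List.mem_cons_of_mem _ hq)]
    · rw [if_neg hc]
      exact ih d (fun q hq => h q (List.mem_cons_of_mem _ hq))

theorem pv_build_pass_getD (l : List (Int × Int)) (L0 : PySem.Dict Int (List Int)) (k : Int) :
    (l.foldl (fun L p => if L.contains p.1 then L.insert p.1 (L.getD p.1 [] ++ [p.2]) else L) L0).getD k []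
      = L0.getD k [] ++ (if L0.contains k then (l.filter (fun p => p.1 == k)).map (·.2) else []) := by
  induction l generalizing L0 with
  | nil => simp
  | cons p l ih =>
    simp only [List.foldl_cons, List.filter_cons]
    by_cases hc : L0.contains p.1
    · simp only [hc, if_pos, ih]
      rw [PySem.Dict.getD_insert]
      by_cases hk : k = p.1
      · subst hk
        simp [hc]
      · have : ¬ (p.1 == k) := by simp [beq_iff_eq]; exact fun h => hk h.symm
        simp only [this, Bool.false_eq_true, PySem.Dict.contains_insert]
        by_cases hk2 : L0.contains k
        · simp [hk2, hk]
        · have : ¬ (k == p.1) := by simp [beq_iff_eq, hk]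
          simp [hk2, this, hk]
    · simp only [hc, Bool.false_eq_true, ih]
      by_cases hk : k = p.1
      · subst hk; simp [hc]
      · have : ¬ (p.1 == k) := by simp [beq_iff_eq]; exact fun h => hk h.symm
        simp [this]

theorem pv_build_pass_keys (l : List (Int × Int)) (L0 : PySem.Dict Int (List Int)) :
    (l.foldl (fun L p => if L.contains p.1 then L.insert p.1 (L.getD p.1 [] ++ [p.2]) else L) L0).keys = L0.keys := by
  induction l generalizing L0 with
  | nil => rfl
  | cons p l ih =>
    simp only [List.foldl_cons]
    by_cases hc : L0.contains p.1
    · simp only [hc, if_pos, ih]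
      exact PySem.Dict.keys_insert_of_contains _ _ hc
    · simp [hc, ih]

theorem pv_A_eq (tr : List (List Int)) (caps : List (Int × Int)) :
    compute_conflicting_sets tr caps
      = ((pvKeys tr).filter (fun k => decide (pvCap caps k < ((pvF tr k).length : Int)))).map
          (fun k => pvF tr k) := by
  have hD : (PySem.List.enumerate tr 0).foldl
      (fun d p => p.2.foldl
        (fun d arc => if arc ≠ 0 then d.modify arc [] (fun l => l ++ [p.1]) else d) d)
      (PySem.Dict.empty : PySem.Dict Int (List Int)) = pvD tr := by
    rw [pvD, pvPairs, ← pv_nested_fold]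
  simp only [compute_conflicting_sets, hD]
  set D := pvD tr with hDdef
  have hcont : ∀ p ∈ D.items, D.contains p.1 = true := fun p hp =>
    (PySem.Dict.contains_iff_mem_keys _ _).2 (PySem.Dict.mem_keys_of_mem_items _ hp)
  have hk2 := pv_zero_pass_keys D.items
    (fun p => (p.2.length : Int) ≤ (PySem.Dict.mk caps).getD p.1 0) D hcont
  have hnd : (D.items.foldl
      (fun d p => if (p.2.length : Int) ≤ (PySem.Dict.mk caps).getD p.1 0
                  then d.insert p.1 ([] : List Int) else d) D).keys.Nodup := by
    rw [hk2]; exact pvD_nodup tr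
  rw [PySem.Dict.values_eq_map_keys _ hnd []]
  rw [hk2, hDdef, pvD_keys]
  have hget : ∀ k ∈ pvKeys tr,
      ((D.items.foldl
        (fun d p => if (p.2.length : Int) ≤ (PySem.Dict.mk caps).getD p.1 0
                    then d.insert p.1 ([] : List Int) else d) D).getD k [])
        = if pvCap caps k < ((pvF tr k).length : Int) then pvF tr k else [] := by
    intro k hk
    rw [pv_zero_pass_getD]
    have hmemk : k ∈ D.keys := by rw [hDdef, pvD_keys]; exact hk
    have hcond : (∃ p ∈ D.items, p.1 = k ∧ (p.2.length : Int) ≤ (PySem.Dict.mk caps).getD p.1 0)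
        ↔ ((pvF tr k).length : Int) ≤ pvCap caps k := by
      constructor
      · rintro ⟨⟨k1, v⟩, hp, h1, h2⟩
        simp only at h1 h2
        subst h1
        have hnD : D.keys.Nodup := by rw [hDdef]; exact pvD_nodup tr
        have := PySem.Dict.getD_of_mem_items D hp hnD ([] : List Int)
        rw [hDdef, pvD_getD] at this
        rw [this]
        simpa [pvCap] using h2
      · intro h
        refine ⟨(k, D.getD k []), ?_, rfl, ?_⟩
        · rw [PySem.Dict.items_eq_map_keys D (by rw [hDdef]; exact pvD_nodup tr) []]
          exact List.mem_map.2 ⟨k, hmemk, rfl⟩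
        · rw [hDdef, pvD_getD]
          simpa [pvCap] using h
    rw [if_congr hcond rfl rfl, hDdef, pvD_getD]
    split_ifs with h1 h2 <;> first | rfl | omega
  rw [List.map_congr_left (fun k hk => hget k hk)]
  rw [List.filter_map]
  have hfc : ∀ k ∈ pvKeys tr,
      ((fun t => !t.isEmpty) ∘ (fun k => if pvCap caps k < ((pvF tr k).length : Int) then pvF tr k else [])) k
        = decide (pvCap caps k < ((pvF tr k).length : Int)) := by
    intro k hk
    simp only [Function.comp]
    split_ifs with h
    · simp [h, List.isEmpty_eq_false_iff, pvF_ne_nil tr k hk]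
    · simp [h]
  rw [List.filter_congr hfc]
  refine List.map_congr_left ?_
  intro k hk
  rw [List.mem_filter] at hk
  rw [if_pos (by simpa using hk.2)]

def pvCounts (tr : List (List Int)) : PySem.Dict Int Int :=
  ((pvPairs tr).map (fun q => q.1)).foldl (fun c x => c.insert x (c.getD x 0 + 1)) PySem.Dict.empty

theorem pvCounts_getD (tr : List (List Int)) (k : Int) :
    (pvCounts tr).getD k 0 = ((pvF tr k).length : Int) := by
  rw [pvCounts, PySem.Dict.getD_foldl_insert_add_one, PySem.Dict.getD_empty, zero_add, pvF_length]

theorem pvCounts_keys (tr : List (List Int)) : (pvCounts tr).keys = pvKeys tr := by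
  rw [pvCounts, PySem.Dict.keys_foldl_insert, PySem.Dict.keys_empty, PySem.Set.update_nil_left, pvKeys]

theorem pvCounts_nodup (tr : List (List Int)) : (pvCounts tr).keys.Nodup :=
  PySem.Dict.nodup_keys_foldl_insert _ _ _ PySem.Dict.nodup_keys_empty

theorem pv_B_eq (tr : List (List Int)) (caps : List (Int × Int)) :
    compute_conflicting_sets_alt tr caps
      = ((pvKeys tr).filter (fun k => decide (pvCap caps k < ((pvF tr k).length : Int)))).map
          (fun k => pvF tr k) := by
  have hC : tr.foldl
      (fun c arcs => arcs.foldl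
        (fun c arc => if arc ≠ 0 then c.insert arc (c.getD arc 0 + 1) else c) c)
      (PySem.Dict.empty : PySem.Dict Int Int) = pvCounts tr := by
    rw [pvCounts, List.foldl_map, pvPairs, ← pv_nested_fold]
    conv_lhs => rw [← PySem.List.map_snd_enumerate tr 0, List.foldl_map]
  simp only [compute_conflicting_sets_alt, hC]
  set S := (pvKeys tr).filter (fun k => decide (pvCap caps k < ((pvF tr k).length : Int))) with hSdef
  set L0 := (pvCounts tr).items.foldl
      (fun L p => if (PySem.Dict.mk caps).getD p.1 0 < p.2
                  then L.insert p.1 ([] : List Int) else L)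
      (PySem.Dict.empty : PySem.Dict Int (List Int)) with hL0def
  have hl0items : L0.items = S.map (fun k => (k, ([] : List Int))) := by
    rw [hL0def]
    have hstep : (List.foldl
        (fun (L : PySem.Dict Int (List Int)) (p : Int × Int) =>
          if (PySem.Dict.mk caps).getD p.1 0 < p.2 then L.insert p.1 ([] : List Int) else L)
        PySem.Dict.empty (pvCounts tr).items)
        = List.foldl (fun L q => L.insert q.1 ([] : List Int)) PySem.Dict.empty
            ((pvCounts tr).items.filter
              (fun q => decide ((PySem.Dict.mk caps).getD q.1 0 < q.2))) :=
      PySem.List.foldl_ite_eq_foldl_filter _ _ _ _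
    rw [hstep]
    have hfresh : (List.foldl (fun (L : PySem.Dict Int (List Int)) q => L.insert q.1 ([] : List Int))
        PySem.Dict.empty
        ((pvCounts tr).items.filter
          (fun q => decide ((PySem.Dict.mk caps).getD q.1 0 < q.2)))).items
        = PySem.Dict.empty.items ++ ((pvCounts tr).items.filter
            (fun q => decide ((PySem.Dict.mk caps).getD q.1 0 < q.2))).map (fun q => (q.1, ([] : List Int))) :=
      PySem.Dict.items_foldl_insert_fresh
        ((pvCounts tr).items.filter (fun q => decide ((PySem.Dict.mk caps).getD q.1 0 < q.2)))
        (fun p : Int × Int => p.1) (fun _ => ([] : List Int)) PySem.Dict.empty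
        (fun a _ => PySem.Dict.contains_empty a.1)
        (List.Nodup.sublist (List.Sublist.map _ List.filter_sublist) (pvCounts_nodup tr))
    rw [hfresh]
    show PySem.Dict.empty.items ++ _ = _
    rw [show (PySem.Dict.empty : PySem.Dict Int (List Int)).items = [] from rfl, List.nil_append]
    rw [PySem.Dict.items_eq_map_keys (pvCounts tr) (pvCounts_nodup tr) 0, pvCounts_keys]
    rw [List.filter_map, List.map_map]
    have : ∀ k ∈ pvKeys tr,
        ((fun q => decide ((PySem.Dict.mk caps).getD q.1 0 < q.2)) ∘ (fun k => (k, (pvCounts tr).getD k 0))) k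
          = decide (pvCap caps k < ((pvF tr k).length : Int)) := by
      intro k _
      simp only [Function.comp, pvCounts_getD, pvCap]
      rfl
    rw [List.filter_congr this]
    rfl
  have hL0keys : L0.keys = S := by
    have hk : L0.keys = L0.items.map (fun p => p.1) := rfl
    rw [hk, hl0items, List.map_map]
    show S.map (fun k => k) = S
    exact List.map_id' S
  have hSnodup : S.Nodup := (PySem.Set.nodup_ofList _).filter _
  have hL0contains : ∀ k, L0.contains k = true ↔ k ∈ S := fun k =>
    (PySem.Dict.contains_iff_mem_keys _ _).trans (by rw [hL0keys])
  have hL0getD : ∀ k, L0.getD k [] = [] := by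
    intro k
    rw [PySem.Dict.getD_eq_get?_getD]
    cases h : L0.get? k with
    | none => rfl
    | some v =>
      have hm := PySem.Dict.mem_items_of_get?_eq_some L0 h
      rw [hl0items] at hm
      obtain ⟨k', _, hk'⟩ := List.mem_map.1 hm
      simp only [Prod.mk.injEq] at hk'
      simp [← hk'.2]
  have hBuild : (PySem.List.enumerate tr 0).foldl
      (fun L p => p.2.foldl
        (fun L arc => if arc ≠ 0 then
            (if L.contains arc then L.insert arc (L.getD arc [] ++ [p.1]) else L)
          else L) L) L0
      = (pvPairs tr).foldl
          (fun L q => if L.contains q.1 then L.insert q.1 (L.getD q.1 [] ++ [q.2]) else L) L0 := by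
    rw [pvPairs, ← pv_nested_fold]
  rw [hBuild]
  have hfkeys : ((pvPairs tr).foldl
      (fun L q => if L.contains q.1 then L.insert q.1 (L.getD q.1 [] ++ [q.2]) else L) L0).keys = S := by
    rw [pv_build_pass_keys, hL0keys]
  have hfnodup : ((pvPairs tr).foldl
      (fun L q => if L.contains q.1 then L.insert q.1 (L.getD q.1 [] ++ [q.2]) else L) L0).keys.Nodup := by
    rw [hfkeys]; exact hSnodup
  rw [PySem.Dict.values_eq_map_keys _ hfnodup [], hfkeys]
  refine List.map_congr_left ?_
  intro k hk
  rw [pv_build_pass_getD, hL0getD, List.nil_append, if_pos ((hL0contains k).2 hk)]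
  rfl

-- ===== VERDICT (by name: the statement is the Claim_ definition above) =====
theorem compute_conflicting_sets_spec : Claim_equal_compute_conflicting_sets := by
  intro tr caps _ _
  unfold Spec_compute_conflicting_sets
  rw [pv_A_eq, pv_B_eq]
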